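-- pv_equiv track=rewrite | github.com/JohannesJamroszczyk/HVR-Labeling-Automation | fileHandling/formattingTools.py | labelList
-- ===== SOURCE A (Python) =====
-- def labelList(matrix):
--     labels = [[], []]
--     number = 10
--     for i in range(0, len(matrix[0])):
--         for j in range(1, len(matrix)):
--             if matrix[j][i] not in labels[1]:
--                 labels[0].append(number)
--                 labels[1].append(matrix[j][i])
--                 number += 1
--     return labels
-- ===== SOURCE B (Python) =====
-- def labelList(matrix):
--     values = [matrix[j][i] for i in range(len(matrix[0])) for j in range(1, len(matrix))]
--     unique = []
--     rest = values
--     while rest: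
--         head = rest[0]
--         unique.append(head)
--         rest = [v for v in rest[1:] if v != head]
--     return [list(range(10, 10 + len(unique))), unique]
-- ===== Notes on version B (the rewrite author's own statement) =====
-- stated objective: alternative
-- what changed: B flattens the matrix into one column-major value list, then extracts the unique column by a selection-style loop that takes the head of the remaining list and filters that value out of the remainder (no seen-list, no membership test, no running counter), and finally produces the IDs as the closed form range(10, 10+len(unique)); A threads a counter through nested loops and scans its growing label list with 'not in' for every element.
import Mathlib
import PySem

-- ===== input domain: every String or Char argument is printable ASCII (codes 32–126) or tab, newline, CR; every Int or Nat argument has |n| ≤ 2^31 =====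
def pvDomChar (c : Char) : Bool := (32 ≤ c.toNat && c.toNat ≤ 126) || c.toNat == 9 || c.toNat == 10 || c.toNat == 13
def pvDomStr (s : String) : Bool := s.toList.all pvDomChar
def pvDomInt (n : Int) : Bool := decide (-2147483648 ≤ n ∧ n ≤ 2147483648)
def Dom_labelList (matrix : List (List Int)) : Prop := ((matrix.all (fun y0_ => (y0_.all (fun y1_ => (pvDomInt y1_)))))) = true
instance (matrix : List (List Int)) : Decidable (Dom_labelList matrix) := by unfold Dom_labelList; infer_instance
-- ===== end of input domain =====

-- B flattens once, extracts the unique column by repeatedly taking the head of the remaining values and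
-- FILTERING it out of the remainder (no seen-list membership test), and emits the IDs as a closed-form range.

-- ===== PORT A =====
def labelList (matrix : List (List Int)) : List (List Int) :=
  let st := (PySem.List.pyRange 0 ((PySem.List.pyGetD matrix 0 []).length : Int) 1).foldl
    (fun st i => (PySem.List.pyRange 1 (matrix.length : Int) 1).foldl
      (fun (st : List Int × List Int × Int) j =>
        let v := PySem.List.pyGetD (PySem.List.pyGetD matrix j []) i 0
        if v ∈ st.2.1 then st
        else (st.1 ++ [st.2.2], st.2.1 ++ [v], st.2.2 + 1)) st)
    (([], [], 10) : List Int × List Int × Int)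
  [st.1, st.2.1]

-- ===== PORT B =====
-- B's while loop: pop the head into `unique`, filter it out of the rest.
def nubLoop : List Int → List Int
  | [] => []
  | h :: t => h :: nubLoop (t.filter (fun v => decide (v ≠ h)))
termination_by l => l.length
decreasing_by
  simp only [List.length_cons, List.length_unattach]
  exact Nat.lt_succ_of_le (le_trans (List.length_filter_le _ _) (by simp))

def labelList_alt (matrix : List (List Int)) : List (List Int) :=
  let values := (PySem.List.pyRange 0 ((PySem.List.pyGetD matrix 0 []).length : Int) 1).flatMap
    (fun i => (PySem.List.pyRange 1 (matrix.length : Int) 1).map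
      (fun j => PySem.List.pyGetD (PySem.List.pyGetD matrix j []) i 0))
  let unique := nubLoop values
  [PySem.List.pyRange 10 (10 + (unique.length : Int)) 1, unique]

-- ===== PRECONDITION & SPEC =====
-- Pre_ excludes exactly the inputs where Python raises IndexError: the empty matrix (matrix[0])
-- and matrices whose later rows are shorter than row 0 (matrix[j][i] out of range).
def Pre_labelList (matrix : List (List Int)) : Prop :=
  matrix ≠ [] ∧ ∀ row ∈ matrix.tail, (PySem.List.pyGetD matrix 0 []).length ≤ row.length
instance (matrix : List (List Int)) : Decidable (Pre_labelList matrix) := by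
  unfold Pre_labelList; infer_instance
def pvWitness_labelList : List (List Int) := [[1, 2], [3, 4], [3, 5]]
def Spec_labelList (matrix : List (List Int)) (out : List (List Int)) : Prop := out = labelList_alt matrix
instance (matrix : List (List Int)) (out : List (List Int)) : Decidable (Spec_labelList matrix out) := by unfold Spec_labelList; infer_instance

-- ===== CLAIM (what is proved, stated in full; the proofs are below) =====
def Claim_equal_labelList : Prop := ∀ (matrix : List (List Int)), Dom_labelList matrix → Pre_labelList matrix → Spec_labelList matrix (labelList matrix)

-- ===== LEMMAS AND PROOFS =====

-- A's inner step, folded over any value list, keeps the invariant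
-- (ids, seen, number) = (range 10 (10+|seen|), seen, 10+|seen|) with seen growing by Set.add.
theorem foldA_inv (l : List Int) (seen : List Int) :
    l.foldl (fun (st : List Int × List Int × Int) v =>
        if v ∈ st.2.1 then st
        else (st.1 ++ [st.2.2], st.2.1 ++ [v], st.2.2 + 1))
      (PySem.List.pyRange 10 (10 + (seen.length : Int)) 1, seen, 10 + (seen.length : Int))
    = (PySem.List.pyRange 10 (10 + ((l.foldl PySem.Set.add seen).length : Int)) 1,
       l.foldl PySem.Set.add seen, 10 + ((l.foldl PySem.Set.add seen).length : Int)) := by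
  induction l generalizing seen with
  | nil => rfl
  | cons v l ih =>
    simp only [List.foldl_cons]
    have ha : PySem.Set.add seen v = if v ∈ seen then seen else seen ++ [v] := by
      simp [PySem.Set.add]
    by_cases h : v ∈ seen
    · rw [if_pos h, ha, if_pos h]; exact ih seen
    · rw [if_neg h, ha, if_neg h]
      have hr : PySem.List.pyRange 10 (10 + (seen.length : Int)) 1 ++ [10 + (seen.length : Int)]
          = PySem.List.pyRange 10 (10 + ((seen ++ [v]).length : Int)) 1 := by
        rw [← PySem.List.pyRange_one_succ_right (by omega)]
        congr 1; simp; omega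
      have hn : 10 + (seen.length : Int) + 1 = 10 + (((seen ++ [v]).length : Int)) := by
        simp; omega
      rw [hr, hn]
      exact ih (seen ++ [v])

-- A's accumulator dedup equals B's head-and-filter dedup of the part not yet seen.
theorem foldAdd_eq_nubLoop_filter (l : List Int) (seen : List Int) :
    l.foldl PySem.Set.add seen = seen ++ nubLoop (l.filter (fun v => decide (v ∉ seen))) := by
  induction l generalizing seen with
  | nil => simp [nubLoop]
  | cons v l ih =>
    simp only [List.foldl_cons, List.filter_cons]
    have ha : PySem.Set.add seen v = if v ∈ seen then seen else seen ++ [v] := by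
      simp [PySem.Set.add]
    by_cases h : v ∈ seen
    · have hd : (decide (v ∉ seen) : Bool) = false := by simp [h]
      rw [ha, if_pos h, hd, if_neg Bool.false_ne_true]
      exact ih seen
    · have hd : (decide (v ∉ seen) : Bool) = true := by simp [h]
      rw [ha, if_neg h, hd, if_pos rfl, ih (seen ++ [v])]
      have hf : (l.filter (fun w => decide (w ∉ seen ++ [v])))
          = ((l.filter (fun w => decide (w ∉ seen))).filter (fun w => decide (w ≠ v))) := by
        rw [List.filter_filter]
        apply List.filter_congr
        intro w _
        simp [List.mem_append, and_comm]
      rw [hf]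
      simp only [nubLoop]
      simp

-- ===== VERDICT (by name: the statement is the Claim_ definition above) =====
theorem labelList_spec : Claim_equal_labelList := by
  intro matrix _ _
  show labelList matrix = labelList_alt matrix
  unfold labelList labelList_alt
  dsimp only
  have e : ((PySem.List.pyRange 0 ((PySem.List.pyGetD matrix 0 []).length : Int) 1).flatMap
      (fun i => (PySem.List.pyRange 1 (matrix.length : Int) 1).map
        (fun j => PySem.List.pyGetD (PySem.List.pyGetD matrix j []) i 0))).foldl
      (fun (st : List Int × List Int × Int) v =>
        if v ∈ st.2.1 then st else (st.1 ++ [st.2.2], st.2.1 ++ [v], st.2.2 + 1)) ([], [], 10)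
      = (PySem.List.pyRange 0 ((PySem.List.pyGetD matrix 0 []).length : Int) 1).foldl
        (fun st i => (PySem.List.pyRange 1 (matrix.length : Int) 1).foldl
          (fun (st : List Int × List Int × Int) j =>
            if PySem.List.pyGetD (PySem.List.pyGetD matrix j []) i 0 ∈ st.2.1 then st
            else (st.1 ++ [st.2.2], st.2.1 ++ [PySem.List.pyGetD (PySem.List.pyGetD matrix j []) i 0],
                  st.2.2 + 1)) st)
        ([], [], 10) := by
    rw [List.foldl_flatMap]; simp only [List.foldl_map]
  rw [← e]
  set values := ((PySem.List.pyRange 0 ((PySem.List.pyGetD matrix 0 []).length : Int) 1).flatMap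
      (fun i => (PySem.List.pyRange 1 (matrix.length : Int) 1).map
        (fun j => PySem.List.pyGetD (PySem.List.pyGetD matrix j []) i 0))) with hv
  have h0 : (([], [], 10) : List Int × List Int × Int)
      = (PySem.List.pyRange 10 (10 + ((([] : List Int)).length : Int)) 1, ([] : List Int),
         10 + ((([] : List Int)).length : Int)) := by
    simp [PySem.List.pyRange_one_eq_nil]
  rw [h0, foldA_inv values []]
  have hnub : values.foldl PySem.Set.add [] = nubLoop values := by
    rw [foldAdd_eq_nubLoop_filter values []]
    simp
  rw [hnub]
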